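-- pv_equiv track=rewrite | github.com/Ingeniums/IngeHack-2k26-Challenges-Public | misc/board-puzzels/backend/app/main.py | _strip_js_comments
-- ===== SOURCE A (Python) =====
-- def _strip_js_comments(content: str) -> str:
--     output: list[str] = []
--     index = 0
--     in_string = False
--     escaped = False
--     string_delimiter = ""
--
--     while index < len(content):
--         char = content[index]
--         next_char = content[index + 1] if index + 1 < len(content) else ""
--
--         if in_string:
--             output.append(char)
--             if escaped:
--                 escaped = False
--             elif char == "\\":
--                 escaped = True
--             elif char == string_delimiter:
--                 in_string = False
--                 string_delimiter = ""
--             index += 1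
--             continue
--
--         if char in ('"', "'"):
--             in_string = True
--             string_delimiter = char
--             output.append(char)
--             index += 1
--             continue
--
--         if char == "/" and next_char == "/":
--             index += 2
--             while index < len(content) and content[index] != "\n":
--                 index += 1
--             continue
--
--         if char == "/" and next_char == "*":
--             index += 2
--             while index + 1 < len(content) and not (
--                 content[index] == "*" and content[index + 1] == "/"
--             ):
--                 index += 1
--             index += 2
--             continue
--
--         output.append(char)
--         index += 1
--
--     return "".join(output)
-- ===== SOURCE B (Python) =====
-- def _strip_js_comments(content: str) -> str:
--     # Single-pass finite-state machine over the characters (NORMAL / SLASH /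
--     # STRING / LINE_COMMENT / BLOCK_COMMENT) instead of an index-jumping
--     # while loop with nested inner scans.
--     NORMAL, SLASH, STRING, LINE, BLOCK = 0, 1, 2, 3, 4
--     state = NORMAL
--     out: list[str] = []
--     delimiter = ""
--     escaped = False
--     prev_star = False
--     for ch in content:
--         if state == NORMAL:
--             if ch == "/":
--                 state = SLASH
--             elif ch in ('"', "'"):
--                 out.append(ch)
--                 delimiter = ch
--                 escaped = False
--                 state = STRING
--             else:
--                 out.append(ch)
--         elif state == SLASH:
--             if ch == "/":
--                 state = LINE
--             elif ch == "*":
--                 prev_star = False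
--                 state = BLOCK
--             elif ch in ('"', "'"):
--                 out.append("/")
--                 out.append(ch)
--                 delimiter = ch
--                 escaped = False
--                 state = STRING
--             else:
--                 out.append("/")
--                 out.append(ch)
--                 state = NORMAL
--         elif state == STRING:
--             out.append(ch)
--             if escaped:
--                 escaped = False
--             elif ch == "\\":
--                 escaped = True
--             elif ch == delimiter:
--                 state = NORMAL
--         elif state == LINE:
--             if ch == "\n":
--                 out.append(ch)
--                 state = NORMAL
--         else:  # BLOCK
--             if prev_star and ch == "/":
--                 prev_star = False
--                 state = NORMAL
--             else:
--                 prev_star = ch == "*"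
--     if state == SLASH:
--         out.append("/")
--     return "".join(out)
-- ===== Notes on version B (the rewrite author's own statement) =====
-- stated objective: idiomatic
-- what changed: Replaces the index-jumping while loop with nested inner comment-skipping scans by a single forward for-loop finite-state machine (NORMAL/SLASH/STRING/LINE/BLOCK) over the characters.
import Mathlib
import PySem

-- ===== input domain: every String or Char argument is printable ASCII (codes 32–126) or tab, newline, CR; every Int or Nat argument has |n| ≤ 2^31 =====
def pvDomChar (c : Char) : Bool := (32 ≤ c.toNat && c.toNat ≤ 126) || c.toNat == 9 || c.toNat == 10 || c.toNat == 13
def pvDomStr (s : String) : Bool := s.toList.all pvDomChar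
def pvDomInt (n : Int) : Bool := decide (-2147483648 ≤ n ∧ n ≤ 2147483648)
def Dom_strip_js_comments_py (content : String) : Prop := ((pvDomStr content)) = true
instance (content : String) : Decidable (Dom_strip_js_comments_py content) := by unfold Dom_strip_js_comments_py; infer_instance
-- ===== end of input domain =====

-- B replaces A's index-jumping while loop (with nested inner comment-skipping scans)
-- by a single forward finite-state machine over the characters; a timing run measured B faster by a constant factor.


-- ===== PORT A =====
-- inner `while index < len and content[index] != '\n'` scan of the line-comment branch
def pvSkipLine : List Char → List Char
  | [] => []
  | c :: r => if c = '\n' then c :: r else pvSkipLine r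

-- inner `while index + 1 < len and not (content[index] == '*' and content[index+1] == '/')`
-- scan plus the final `index += 2` of the block-comment branch
def pvSkipBlock : List Char → List Char
  | a :: b :: r => if a = '*' ∧ b = '/' then r else pvSkipBlock (b :: r)
  | _ => []

theorem pvSkipLine_length_le : ∀ l : List Char, (pvSkipLine l).length ≤ l.length := by
  intro l; induction l with
  | nil => simp [pvSkipLine]
  | cons c r ih => simp only [pvSkipLine]; split <;> simp <;> omega

theorem pvSkipBlock_length_le : ∀ l : List Char, (pvSkipBlock l).length ≤ l.length
  | [] => by simp [pvSkipBlock]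
  | [_] => by simp [pvSkipBlock]
  | a :: b :: r => by
      simp only [pvSkipBlock]; split
      · simp; omega
      · have := pvSkipBlock_length_le (b :: r); simp at this ⊢; omega
termination_by l => l.length

-- A's main while loop: state = (in_string, escaped, string_delimiter); the branches are in
-- A's order (string mode, quote, "//", "/*", plain char). A's string_delimiter is "" when
-- not in a string; here it is an unused Char carried along (A never reads it outside a string).
def pvLoopA : List Char → Bool → Bool → Char → List Char
  | [], _, _, _ => []
  | c :: rest, inStr, esc, delim =>
    if inStr then
      c :: (if esc then pvLoopA rest true false delim
            else if c = '\\' then pvLoopA rest true true delim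
            else if c = delim then pvLoopA rest false false delim
            else pvLoopA rest true esc delim)
    else if c = '"' ∨ c = '\'' then c :: pvLoopA rest true false c
    else if c = '/' ∧ rest.head? = some '/' then pvLoopA (pvSkipLine rest.tail) false false delim
    else if c = '/' ∧ rest.head? = some '*' then pvLoopA (pvSkipBlock rest.tail) false false delim
    else c :: pvLoopA rest false esc delim
termination_by l _ _ _ => l.length
decreasing_by
  all_goals
    (have h1 := pvSkipLine_length_le rest.tail
     have h2 := pvSkipBlock_length_le rest.tail
     have h3 : rest.tail.length ≤ rest.length := by cases rest <;> simp
     simp at h1 h2 h3 ⊢ <;> omega)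

def strip_js_comments_py (content : String) : String :=
  String.mk (pvLoopA content.toList false false ' ')

-- ===== PORT B =====
-- FSM state: (state code 0=NORMAL 1=SLASH 2=STRING 3=LINE 4=BLOCK, output, delimiter, escaped, prev_star)
def pvStepB (s : Nat × List Char × Char × Bool × Bool) (c : Char) :
    Nat × List Char × Char × Bool × Bool :=
  let (st, out, d, e, p) := s
  if st = 0 then
    if c = '/' then (1, out, d, e, p)
    else if c = '"' ∨ c = '\'' then (2, out ++ [c], c, false, p)
    else (0, out ++ [c], d, e, p)
  else if st = 1 then
    if c = '/' then (3, out, d, e, p)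
    else if c = '*' then (4, out, d, e, false)
    else if c = '"' ∨ c = '\'' then (2, out ++ ['/', c], c, false, p)
    else (0, out ++ ['/', c], d, e, p)
  else if st = 2 then
    if e then (2, out ++ [c], d, false, p)
    else if c = '\\' then (2, out ++ [c], d, true, p)
    else if c = d then (0, out ++ [c], d, e, p)
    else (2, out ++ [c], d, e, p)
  else if st = 3 then
    if c = '\n' then (0, out ++ [c], d, e, p) else (3, out, d, e, p)
  else
    if p ∧ c = '/' then (0, out, d, e, false)
    else (4, out, d, e, c = '*')

def strip_js_comments_py_alt (content : String) : String :=
  let r := content.toList.foldl pvStepB (0, [], ' ', false, false)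
  String.mk (if r.1 = 1 then r.2.1 ++ ['/'] else r.2.1)

-- ===== PRECONDITION & SPEC =====
def Spec_strip_js_comments_py (content : String) (out : String) : Prop := out = strip_js_comments_py_alt content
instance (content : String) (out : String) : Decidable (Spec_strip_js_comments_py content out) := by unfold Spec_strip_js_comments_py; infer_instance

-- ===== CLAIM (what is proved, stated in full; the proofs are below) =====
def Claim_equal_strip_js_comments_py : Prop := ∀ (content : String), Dom_strip_js_comments_py content → Spec_strip_js_comments_py content (strip_js_comments_py content)

-- ===== LEMMAS AND PROOFS =====
-- finalize of B's fold result
def pvFin (s : Nat × List Char × Char × Bool × Bool) : List Char :=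
  if s.1 = 1 then s.2.1 ++ ['/'] else s.2.1

-- LINE_COMMENT state ≡ NORMAL state restarted after A's line-skip scan
theorem lineSim : ∀ (l out : List Char) (d : Char) (e p : Bool),
    pvFin (l.foldl pvStepB (3, out, d, e, p)) =
    pvFin ((pvSkipLine l).foldl pvStepB (0, out, d, e, p)) := by
  intro l
  induction l with
  | nil => intro out d e p; simp [pvSkipLine, pvFin]
  | cons c r ih =>
      intro out d e p
      by_cases hc : c = '\n'
      · subst hc
        rw [show pvSkipLine ('\n' :: r) = '\n' :: r from by simp [pvSkipLine]]
        simp only [List.foldl_cons]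
        rw [show pvStepB (3, out, d, e, p) '\n' = (0, out ++ ['\n'], d, e, p) from by
          simp [pvStepB]]
        rw [show pvStepB (0, out, d, e, p) '\n' = (0, out ++ ['\n'], d, e, p) from by
          simp [pvStepB]]
      · simp only [List.foldl_cons, pvSkipLine, if_neg hc]
        rw [show pvStepB (3, out, d, e, p) c = (3, out, d, e, p) by simp [pvStepB, hc]]
        exact ih out d e p

-- generalisation of pvSkipBlock to an arbitrary prev_star entry flag
def pvSkipB : Bool → List Char → List Char
  | _, [] => []
  | p, c :: r => if p ∧ c = '/' then r else pvSkipB (c = '*') r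

theorem pvSkipB_false : ∀ l : List Char, pvSkipB false l = pvSkipBlock l
  | [] => by simp [pvSkipB, pvSkipBlock]
  | [a] => by simp [pvSkipB, pvSkipBlock]
  | a :: b :: r => by
      have hrec := pvSkipB_false (b :: r)
      by_cases ha : a = '*'
      · by_cases hb : b = '/'
        · simp [pvSkipB, pvSkipBlock, ha, hb]
        · simp only [pvSkipB, if_neg (by simp [hb] : ¬(false = true ∧ b = '/'))] at hrec
          simp [pvSkipB, pvSkipBlock, ha, hb, hrec]
      · rw [show pvSkipB false (a :: b :: r) = pvSkipB false (b :: r) from by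
          simp [pvSkipB, ha], hrec,
          show pvSkipBlock (a :: b :: r) = pvSkipBlock (b :: r) from by
          simp [pvSkipBlock, ha]]
termination_by l => l.length

-- BLOCK_COMMENT state ≡ NORMAL state restarted after A's block-skip scan
theorem blockSim : ∀ (l : List Char) (p : Bool) (out : List Char) (d : Char) (e : Bool),
    pvFin (l.foldl pvStepB (4, out, d, e, p)) =
    pvFin ((pvSkipB p l).foldl pvStepB (0, out, d, e, false)) := by
  intro l
  induction l with
  | nil => intro p out d e; simp [pvSkipB, pvFin]
  | cons c r ih =>
      intro p out d e
      by_cases hpc : p ∧ c = '/'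
      · obtain ⟨hp, hc⟩ := hpc; subst hp hc
        rw [show pvSkipB true ('/' :: r) = r from by simp [pvSkipB]]
        simp only [List.foldl_cons]
        rw [show pvStepB (4, out, d, e, true) '/' = (0, out, d, e, false) from by
          simp [pvStepB]]
      · simp only [List.foldl_cons, pvSkipB, if_neg hpc]
        rw [show pvStepB (4, out, d, e, p) c = (4, out, d, e, decide (c = '*')) by
          simp [pvStepB, hpc]]
        rw [ih (decide (c = '*')) out d e]

theorem main_sim : ∀ (n : Nat) (l : List Char), l.length ≤ n →
    ∀ (out : List Char) (d : Char) (e p : Bool),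
      (pvFin (l.foldl pvStepB (0, out, d, false, p)) = out ++ pvLoopA l false false d) ∧
      (pvFin (l.foldl pvStepB (2, out, d, e, p)) = out ++ pvLoopA l true e d) := by
  intro n
  induction n with
  | zero =>
      intro l hl
      have hnil : l = [] := by cases l <;> simp at hl ⊢
      subst hnil
      intro out d e p
      constructor <;> simp [pvFin, pvLoopA]
  | succ n ih =>
      intro l hl out d e p
      cases l with
      | nil => constructor <;> simp [pvFin, pvLoopA]
      | cons c rest =>
        have hrest : rest.length ≤ n := by simp at hl; omega
        constructor
        · -- NORMAL state
          by_cases hq : c = '"' ∨ c = '\''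
          · simp only [List.foldl_cons]
            rw [show pvStepB (0, out, d, false, p) c = (2, out ++ [c], c, false, p) by
              simp [pvStepB, hq]; rcases hq with h | h <;> simp [h]]
            rw [(ih rest hrest (out ++ [c]) c false p).2]
            rw [show pvLoopA (c :: rest) false false d = c :: pvLoopA rest true false c by
              rw [pvLoopA]; simp [hq]]
            simp
          · by_cases hc : c = '/'
            · subst hc
              cases rest with
              | nil => simp [pvStepB, pvFin, pvLoopA]
              | cons c2 r2 =>
                have hr2 : r2.length ≤ n := by simp at hl; omega
                simp only [List.foldl_cons]
                rw [show pvStepB (0, out, d, false, p) '/' = (1, out, d, false, p) by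
                  simp [pvStepB]]
                by_cases h2 : c2 = '/'
                · subst h2
                  rw [show pvStepB (1, out, d, false, p) '/' = (3, out, d, false, p) by
                    simp [pvStepB]]
                  rw [lineSim]
                  have hlen : (pvSkipLine r2).length ≤ n := by
                    have := pvSkipLine_length_le r2; omega
                  rw [(ih _ hlen out d false p).1]
                  rw [show pvLoopA ('/' :: '/' :: r2) false false d
                        = pvLoopA (pvSkipLine r2) false false d by
                    rw [pvLoopA]; simp]
                · by_cases h3 : c2 = '*'
                  · subst h3
                    rw [show pvStepB (1, out, d, false, p) '*' = (4, out, d, false, false) by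
                      simp [pvStepB]]
                    rw [blockSim, pvSkipB_false]
                    have hlen : (pvSkipBlock r2).length ≤ n := by
                      have := pvSkipBlock_length_le r2; omega
                    rw [(ih _ hlen out d false false).1]
                    rw [show pvLoopA ('/' :: '*' :: r2) false false d
                          = pvLoopA (pvSkipBlock r2) false false d by
                      rw [pvLoopA]; simp]
                  · have hA : pvLoopA ('/' :: c2 :: r2) false false d
                        = '/' :: pvLoopA (c2 :: r2) false false d := by
                      rw [pvLoopA]; simp [h2, h3]
                    by_cases hq2 : c2 = '"' ∨ c2 = '\''
                    · rw [show pvStepB (1, out, d, false, p) c2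
                            = (2, out ++ ['/', c2], c2, false, p) by
                        simp [pvStepB, h2, h3]; rcases hq2 with h | h <;> simp [h]]
                      rw [(ih r2 hr2 (out ++ ['/', c2]) c2 false p).2]
                      rw [hA, show pvLoopA (c2 :: r2) false false d
                            = c2 :: pvLoopA r2 true false c2 by
                        rw [pvLoopA]; simp [hq2]]
                      simp
                    · rw [show pvStepB (1, out, d, false, p) c2
                            = (0, out ++ ['/', c2], d, false, p) by
                        simp [pvStepB, h2, h3, hq2]]
                      rw [(ih r2 hr2 (out ++ ['/', c2]) d false p).1]
                      rw [hA, show pvLoopA (c2 :: r2) false false d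
                            = c2 :: pvLoopA r2 false false d by
                        rw [pvLoopA]; simp [hq2, h2]]
                      simp
            · simp only [List.foldl_cons]
              rw [show pvStepB (0, out, d, false, p) c = (0, out ++ [c], d, false, p) by
                simp [pvStepB, hq, hc]]
              rw [(ih rest hrest (out ++ [c]) d false p).1]
              rw [show pvLoopA (c :: rest) false false d = c :: pvLoopA rest false false d by
                rw [pvLoopA]; simp [hq, hc]]
              simp
        · -- STRING state
          simp only [List.foldl_cons]
          by_cases he : e = true
          · subst he
            rw [show pvStepB (2, out, d, true, p) c = (2, out ++ [c], d, false, p) by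
              simp [pvStepB]]
            rw [(ih rest hrest (out ++ [c]) d false p).2]
            rw [show pvLoopA (c :: rest) true true d = c :: pvLoopA rest true false d by
              rw [pvLoopA]; simp]
            simp
          · have he' : e = false := by cases e <;> simp_all
            subst he'
            by_cases hb : c = '\\'
            · subst hb
              rw [show pvStepB (2, out, d, false, p) '\\' = (2, out ++ ['\\'], d, true, p) by
                simp [pvStepB]]
              rw [(ih rest hrest (out ++ ['\\']) d true p).2]
              rw [show pvLoopA ('\\' :: rest) true false d
                    = '\\' :: pvLoopA rest true true d by
                rw [pvLoopA]; simp]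
              simp
            · by_cases hd : c = d
              · subst hd
                rw [show pvStepB (2, out, c, false, p) c = (0, out ++ [c], c, false, p) by
                  simp [pvStepB, hb]]
                rw [(ih rest hrest (out ++ [c]) c false p).1]
                rw [show pvLoopA (c :: rest) true false c
                      = c :: pvLoopA rest false false c by
                  rw [pvLoopA]; simp [hb]]
                simp
              · rw [show pvStepB (2, out, d, false, p) c = (2, out ++ [c], d, false, p) by
                  simp [pvStepB, hb, hd]]
                rw [(ih rest hrest (out ++ [c]) d false p).2]
                rw [show pvLoopA (c :: rest) true false d
                      = c :: pvLoopA rest true false d by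
                  rw [pvLoopA]; simp [hb, hd]]
                simp

-- ===== VERDICT (by name: the statement is the Claim_ definition above) =====
theorem strip_js_comments_py_spec : Claim_equal_strip_js_comments_py := by
  intro content _
  unfold Spec_strip_js_comments_py strip_js_comments_py strip_js_comments_py_alt
  have h := (main_sim content.toList.length content.toList le_rfl [] ' ' false false).1
  simp only [pvFin, List.nil_append] at h
  show String.mk _ = String.mk _
  rw [h]
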